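-- pv_equiv track=rewrite | github.com/cagdaskaya/ck-mia-rules | app.py | separate_rules
-- ===== SOURCE A (Python) =====
-- def separate_rules(parsed_rules):
--     """
--     Separates parsed rules into socks rules and client rules.
--
--     Args:
--         parsed_rules (list): A list of dictionaries where each dictionary
--                              represents a rule with a "rule_type" key.
--
--     Returns:
--         tuple: A tuple containing two lists:
--                - socks_rules (list): A list of rules where "rule_type"
--                  is "socks".
--                - client_rules (list): A list of rules where "rule_type"
--                  is "client".
--     """
--     socks_rules = [
--         rule for rule in parsed_rules if rule["rule_type"] == "socks"
--     ]
--     client_rules = [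
--         rule for rule in parsed_rules if rule["rule_type"] == "client"
--     ]
--     return socks_rules, client_rules
-- ===== SOURCE B (Python) =====
-- def separate_rules(parsed_rules):
--     groups = {}
--     for rule in parsed_rules:
--         groups.setdefault(rule["rule_type"], []).append(rule)
--     return groups.get("socks", []), groups.get("client", [])
-- ===== Notes on version B (the rewrite author's own statement) =====
-- stated objective: alternative
-- what changed: Replaces A's two filtering comprehensions with a general group-by: one pass builds a dict indexing rules by rule_type, then the 'socks' and 'client' buckets are read off with two O(1) lookups.
import Mathlib
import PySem

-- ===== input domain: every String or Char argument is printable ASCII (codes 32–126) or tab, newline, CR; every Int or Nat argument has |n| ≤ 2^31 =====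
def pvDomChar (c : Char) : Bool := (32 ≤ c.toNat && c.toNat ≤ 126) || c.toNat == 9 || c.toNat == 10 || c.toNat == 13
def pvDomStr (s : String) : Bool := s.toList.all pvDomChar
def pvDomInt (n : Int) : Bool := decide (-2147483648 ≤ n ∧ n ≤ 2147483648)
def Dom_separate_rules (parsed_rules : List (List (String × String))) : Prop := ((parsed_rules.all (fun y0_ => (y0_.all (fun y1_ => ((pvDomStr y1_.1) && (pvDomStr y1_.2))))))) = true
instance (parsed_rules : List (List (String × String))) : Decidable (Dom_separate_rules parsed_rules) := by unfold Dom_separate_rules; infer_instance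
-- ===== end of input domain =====

-- B replaces A's two filtering comprehensions with a group-by dict built in one pass, read off at "socks"/"client"; A = B wherever every rule has a "rule_type" key (elsewhere both Pythons raise KeyError).


-- ===== PORT A =====
-- rule["rule_type"]: first-match dict lookup; inside Pre_ the key is present, so getD "" is exact
def pvRuleType (rule : List (String × String)) : String :=
  ((PySem.Dict.mk rule).get? "rule_type").getD ""

def separate_rules (parsed_rules : List (List (String × String))) : (List (List (String × String))) × (List (List (String × String))) :=
  (parsed_rules.filter (fun rule => pvRuleType rule == "socks"),
   parsed_rules.filter (fun rule => pvRuleType rule == "client"))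

-- ===== PORT B =====
-- groups.setdefault(t, []).append(rule) = groups[t] = groups.get(t, []) + [rule] = Dict.modify t [] (· ++ [rule])
def separate_rules_alt (parsed_rules : List (List (String × String))) : (List (List (String × String))) × (List (List (String × String))) :=
  let groups :=
    parsed_rules.foldl
      (fun d rule => d.modify (pvRuleType rule) ([] : List (List (String × String))) (· ++ [rule]))
      PySem.Dict.empty
  (groups.getD "socks" [], groups.getD "client" [])

-- ===== PRECONDITION & SPEC =====
-- Pre_ excludes exactly the inputs where some rule lacks a "rule_type" key: there both Pythons raise KeyError.
def Pre_separate_rules (parsed_rules : List (List (String × String))) : Prop :=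
  (parsed_rules.all (fun rule => rule.any (fun p => p.1 == "rule_type"))) = true
instance (parsed_rules : List (List (String × String))) : Decidable (Pre_separate_rules parsed_rules) := by unfold Pre_separate_rules; infer_instance

def pvWitness_separate_rules : (List (List (String × String))) :=
  [[("rule_type", "socks"), ("host", "a")], [("rule_type", "client")], [("rule_type", "other")]]

def Spec_separate_rules (parsed_rules : List (List (String × String))) (out : (List (List (String × String))) × (List (List (String × String)))) : Prop := out = separate_rules_alt parsed_rules
instance (parsed_rules : List (List (String × String))) (out : (List (List (String × String))) × (List (List (String × String)))) : Decidable (Spec_separate_rules parsed_rules out) := by unfold Spec_separate_rules; infer_instance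

-- ===== CLAIM (what is proved, stated in full; the proofs are below) =====
def Claim_equal_separate_rules : Prop := ∀ (parsed_rules : List (List (String × String))), Dom_separate_rules parsed_rules → Pre_separate_rules parsed_rules → Spec_separate_rules parsed_rules (separate_rules parsed_rules)

-- ===== LEMMAS AND PROOFS =====
-- The group-by dict's bucket at any key c is exactly the filter of the input at that key.
theorem groups_getD_eq_filter (l : List (List (String × String))) (c : String) :
    (l.foldl
       (fun d rule => d.modify (pvRuleType rule) ([] : List (List (String × String))) (· ++ [rule]))
       PySem.Dict.empty).getD c []
    = l.filter (fun rule => pvRuleType rule == c) := by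
  have h := PySem.Dict.getD_foldl_modify_append
    (l := l.map (fun rule => (pvRuleType rule, rule)))
    (d := (PySem.Dict.empty : PySem.Dict String (List (List (String × String))))) (c := c)
  rw [List.foldl_map] at h
  simp only [PySem.Dict.getD_empty] at h
  rw [h]
  rw [List.filter_map]
  simp [Function.comp_def]

theorem separate_rules_spec : Claim_equal_separate_rules := by
  intro parsed_rules _ _
  unfold Spec_separate_rules separate_rules separate_rules_alt
  simp only []
  rw [groups_getD_eq_filter, groups_getD_eq_filter]
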